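-- pv_equiv track=rewrite | github.com/hrs2203/algorithmsHrs | AI_01_NBC/try1.py | seprate_by_class
-- ===== SOURCE A (Python) =====
-- def seprate_by_class(train_set, result_set):
-- 	response = dict()
-- 	dataset_len = len(result_set)
-- 	for i in range(dataset_len):
-- 		if result_set[i] not in response:
-- 			response[result_set[i]] = [ train_set[i] ]
-- 		else:
-- 			response[result_set[i]].append(train_set[i])
-- 	return response
-- ===== SOURCE B (Python) =====
-- def seprate_by_class(train_set, result_set):
--     labels = list(dict.fromkeys(result_set))
--     return {lab: [train_set[i] for i in range(len(result_set)) if result_set[i] == lab]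
--             for lab in labels}
-- ===== Notes on version B (the rewrite author's own statement) =====
-- stated objective: alternative
-- what changed: B first dedups the labels (dict.fromkeys) and then builds each group by a full scan over the rows per label, instead of A's single pass that grows a dict entry per row.
import Mathlib
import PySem

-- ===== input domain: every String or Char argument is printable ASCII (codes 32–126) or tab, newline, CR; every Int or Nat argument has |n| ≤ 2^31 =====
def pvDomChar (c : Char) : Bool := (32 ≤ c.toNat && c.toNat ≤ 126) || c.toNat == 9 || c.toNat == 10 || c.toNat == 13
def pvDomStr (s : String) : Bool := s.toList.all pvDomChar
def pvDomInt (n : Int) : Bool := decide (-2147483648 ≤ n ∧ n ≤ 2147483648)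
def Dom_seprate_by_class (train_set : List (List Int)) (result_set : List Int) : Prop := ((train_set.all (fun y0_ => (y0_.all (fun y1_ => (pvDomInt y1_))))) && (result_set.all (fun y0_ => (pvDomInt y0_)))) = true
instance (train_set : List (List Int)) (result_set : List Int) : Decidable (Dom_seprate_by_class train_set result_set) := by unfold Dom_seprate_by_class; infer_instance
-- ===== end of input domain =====

-- B groups rows by building the distinct-label list first and then scanning all rows once per
-- label, instead of A's single dict-growing pass; same return value on Pre_ (alternative shape).

-- ===== PORT A =====
-- literal transliteration of A: a dict built in one pass over range(len(result_set));
-- result_set[i] / train_set[i] via pyGetD — the default is never read inside Pre_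
-- (outside Pre_ Python raises IndexError, excluded below).
def seprate_by_class (train_set : List (List Int)) (result_set : List Int) : List (Int × List (List Int)) :=
  ((PySem.List.pyRange 0 (PySem.List.len result_set) 1).foldl
    (fun response i =>
      let k := PySem.List.pyGetD result_set i 0
      if response.contains k = false then
        response.insert k [PySem.List.pyGetD train_set i []]
      else
        response.modify k [] (fun v => v ++ [PySem.List.pyGetD train_set i []]))
    PySem.Dict.empty).items

-- ===== PORT B =====
-- literal transliteration of B: labels = dedup(result_set); for each label a full scan
-- collecting the rows whose label matches.
def seprate_by_class_alt (train_set : List (List Int)) (result_set : List Int) : List (Int × List (List Int)) :=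
  (PySem.List.dedup result_set).map (fun lab =>
    (lab,
      ((PySem.List.pyRange 0 (PySem.List.len result_set) 1).filter
          (fun i => PySem.List.pyGetD result_set i 0 == lab)).map
        (fun i => PySem.List.pyGetD train_set i [])))

-- ===== PRECONDITION & SPEC =====
-- Pre_ excludes exactly the inputs where Python A raises IndexError: a train_set shorter
-- than result_set (B raises the same way there).
def Pre_seprate_by_class (train_set : List (List Int)) (result_set : List Int) : Prop :=
  result_set.length ≤ train_set.length
instance (train_set : List (List Int)) (result_set : List Int) : Decidable (Pre_seprate_by_class train_set result_set) := by unfold Pre_seprate_by_class; infer_instance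
def pvWitness_seprate_by_class : List (List Int) × List Int := ([[1, 2], [3, 4], [5, 6]], [0, 1, 0])

def Spec_seprate_by_class (train_set : List (List Int)) (result_set : List Int) (out : List (Int × List (List Int))) : Prop := out = seprate_by_class_alt train_set result_set
instance (train_set : List (List Int)) (result_set : List Int) (out : List (Int × List (List Int))) : Decidable (Spec_seprate_by_class train_set result_set out) := by unfold Spec_seprate_by_class; infer_instance

-- ===== CLAIM (what is proved, stated in full; the proofs are below) =====
def Claim_equal_seprate_by_class : Prop := ∀ (train_set : List (List Int)) (result_set : List Int), Dom_seprate_by_class train_set result_set → Pre_seprate_by_class train_set result_set → Spec_seprate_by_class train_set result_set (seprate_by_class train_set result_set)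

-- ===== LEMMAS AND PROOFS =====

-- A's branch (insert-new / append-existing) is exactly Dict.modify with default [].
lemma step_eq_modify (d : PySem.Dict Int (List (List Int))) (k : Int) (t : List Int) :
    (if d.contains k = false then d.insert k [t] else d.modify k [] (fun v => v ++ [t]))
      = d.modify k [] (fun v => v ++ [t]) := by
  by_cases h : d.contains k = true
  · simp [h]
  · simp only [Bool.not_eq_true] at h
    simp [h, PySem.Dict.modify, PySem.Dict.getD_of_not_contains d ([] : List (List Int)) h]

-- A's fold rewritten as a modify-fold over an arbitrary index list.
lemma foldA_eq_foldModify (train_set : List (List Int)) (result_set : List Int)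
    (l : List Int) (d : PySem.Dict Int (List (List Int))) :
    l.foldl (fun response i =>
        let k := PySem.List.pyGetD result_set i 0
        if response.contains k = false then
          response.insert k [PySem.List.pyGetD train_set i []]
        else
          response.modify k [] (fun v => v ++ [PySem.List.pyGetD train_set i []])) d
      = l.foldl (fun response i =>
          response.modify (PySem.List.pyGetD result_set i 0) []
            (fun v => v ++ [PySem.List.pyGetD train_set i []])) d := by
  simp only [step_eq_modify]

-- The modify-fold's items, read off as dedup'd labels each paired with its filtered rows.
lemma items_fold (train_set : List (List Int)) (result_set : List Int) :
    ((PySem.List.pyRange 0 (PySem.List.len result_set) 1).foldl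
        (fun response i =>
          response.modify (PySem.List.pyGetD result_set i 0) []
            (fun v => v ++ [PySem.List.pyGetD train_set i []])) PySem.Dict.empty).items
      = (PySem.List.dedup result_set).map (fun lab =>
          (lab,
            ((PySem.List.pyRange 0 (PySem.List.len result_set) 1).filter
                (fun i => PySem.List.pyGetD result_set i 0 == lab)).map
              (fun i => PySem.List.pyGetD train_set i []))) := by
  have hfold :
      (PySem.List.pyRange 0 (PySem.List.len result_set) 1).foldl
          (fun response i =>
            response.modify (PySem.List.pyGetD result_set i 0) []
              (fun v => v ++ [PySem.List.pyGetD train_set i []])) PySem.Dict.empty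
        = ((PySem.List.pyRange 0 (PySem.List.len result_set) 1).map
              (fun i => (PySem.List.pyGetD result_set i 0, PySem.List.pyGetD train_set i []))).foldl
            (fun response p => response.modify p.1 [] (fun v => v ++ [p.2])) PySem.Dict.empty := by
    rw [List.foldl_map]
  rw [hfold]
  set pairs := (PySem.List.pyRange 0 (PySem.List.len result_set) 1).map
      (fun i => (PySem.List.pyGetD result_set i 0, PySem.List.pyGetD train_set i [])) with hpairs
  have hnd : ((pairs.foldl (fun response p => response.modify p.1 [] (fun v => v ++ [p.2]))
      PySem.Dict.empty)).keys.Nodup :=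
    PySem.Dict.nodup_keys_foldl_modify_key pairs Prod.fst [] (fun _ p v => v ++ [p.2])
      PySem.Dict.empty PySem.Dict.nodup_keys_empty
  rw [PySem.Dict.items_eq_map_keys _ hnd []]
  have hkeys : ((pairs.foldl (fun response p => response.modify p.1 [] (fun v => v ++ [p.2]))
      PySem.Dict.empty)).keys = PySem.List.dedup result_set := by
    have h1 := PySem.Dict.keys_foldl_modify_key pairs Prod.fst [] (fun _ p v => v ++ [p.2])
      PySem.Dict.empty
    have h2 : pairs.map Prod.fst = result_set := by
      rw [hpairs, List.map_map]
      exact PySem.List.map_pyGetD_pyRange_zero' result_set 0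
    rw [h1, h2]
    rfl
  rw [hkeys]
  apply List.map_congr_left
  intro lab _
  have hg := PySem.Dict.getD_foldl_modify_append pairs PySem.Dict.empty lab
  rw [hg]
  simp only [PySem.Dict.getD_empty, List.nil_append, hpairs, List.filter_map, List.map_map]
  rfl

theorem seprate_by_class_spec : Claim_equal_seprate_by_class := by
  intro train_set result_set _ _
  unfold Spec_seprate_by_class seprate_by_class seprate_by_class_alt
  rw [foldA_eq_foldModify, items_fold]
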